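-- pv_equiv track=rewrite | github.com/Allenyou1126/auto-wordatro | src/word.py | gen_perms
-- ===== SOURCE A (Python) =====
-- import itertools
--
-- def gen_perms(word, n_ex):
--     n = len(word) + n_ex
--     perms = []
--     for pos in itertools.combinations(range(n), len(word)):
--         arr = ['!'] * n
--         for i in range(len(pos)):
--             arr[pos[i]] = word[i]
--         perms.append(''.join(arr))
--     return perms
-- ===== SOURCE B (Python) =====
-- def gen_perms(word, n_ex):
--     n = len(word) + n_ex
--     res = []
--
--     def go(i, j, pre):
--         if i >= n:
--             if j == len(word):
--                 res.append(pre)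
--             return
--         if len(word) - j > n - i:
--             return
--         if j < len(word):
--             go(i + 1, j + 1, pre + word[j])
--         go(i + 1, j, pre + '!')
--
--     go(0, 0, '')
--     return res
-- ===== Notes on version B (the rewrite author's own statement) =====
-- stated objective: alternative
-- what changed: Replaces the combinations-then-scatter construction (enumerate index tuples, then write letters into a fresh '!'-array per tuple) by a recursive slot-by-slot builder that extends a shared prefix, branching letter-first then '!' with a feasibility prune, reproducing the same order directly.
import Mathlib
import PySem

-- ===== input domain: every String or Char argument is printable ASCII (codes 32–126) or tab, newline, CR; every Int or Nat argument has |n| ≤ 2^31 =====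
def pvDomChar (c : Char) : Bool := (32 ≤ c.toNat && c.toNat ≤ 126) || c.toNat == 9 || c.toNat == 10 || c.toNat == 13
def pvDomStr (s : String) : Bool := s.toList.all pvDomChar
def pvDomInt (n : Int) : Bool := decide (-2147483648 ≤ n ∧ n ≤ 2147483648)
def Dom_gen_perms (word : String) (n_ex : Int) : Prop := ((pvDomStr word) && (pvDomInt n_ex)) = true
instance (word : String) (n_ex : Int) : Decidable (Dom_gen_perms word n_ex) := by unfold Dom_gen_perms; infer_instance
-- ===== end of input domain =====

-- B replaces A's combinations-then-scatter enumeration by a recursive slot-by-slot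
-- builder with a feasibility prune (alternative decomposition, same output order).


-- ===== PORT A =====
-- itertools.combinations(l, k) in lexicographic order (hand port: no PySem primitive)
def pvCombs {α : Type} (l : List α) (k : Nat) : List (List α) :=
  match k, l with
  | 0, _ => [[]]
  | _ + 1, [] => []
  | k + 1, x :: xs => (pvCombs xs k).map (x :: ·) ++ pvCombs xs (k + 1)

-- the inner loop `for i in range(len(pos)): arr[pos[i]] = word[i]` (len(pos) = len(word))
def pvScatter (pairs : List (Nat × Char)) (arr : List Char) : List Char :=
  pairs.foldl (fun a pc => a.set pc.1 pc.2) arr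

def gen_perms (word : String) (n_ex : Int) : List String :=
  let wl := word.toList
  let n : Int := (wl.length : Int) + n_ex
  (pvCombs (List.range n.toNat) wl.length).map
    (fun pos => String.mk (pvScatter (pos.zip wl) (List.replicate n.toNat '!')))

-- ===== PORT B =====
-- recursive slot-by-slot builder: slot index i, word index j, current prefix pre
def pvGo (w : List Char) (n : Int) (i : Int) (j : Nat) (pre : List Char) : List (List Char) :=
  if _h1 : i ≥ n then (if j = w.length then [pre] else [])
  else if (w.length : Int) - (j : Int) > n - i then []
  else
    (if h : j < w.length then pvGo w n (i + 1) (j + 1) (pre ++ [w[j]]) else []) ++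
    pvGo w n (i + 1) j (pre ++ ['!'])
termination_by (n - i).toNat
decreasing_by all_goals omega

def gen_perms_alt (word : String) (n_ex : Int) : List String :=
  let wl := word.toList
  let n : Int := (wl.length : Int) + n_ex
  (pvGo wl n 0 0 []).map String.mk

-- ===== PRECONDITION & SPEC =====
def Spec_gen_perms (word : String) (n_ex : Int) (out : List String) : Prop := out = gen_perms_alt word n_ex
instance (word : String) (n_ex : Int) (out : List String) : Decidable (Spec_gen_perms word n_ex out) := by unfold Spec_gen_perms; infer_instance

-- ===== CLAIM (what is proved, stated in full; the proofs are below) =====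
def Claim_equal_gen_perms : Prop := ∀ (word : String) (n_ex : Int), Dom_gen_perms word n_ex → Spec_gen_perms word n_ex (gen_perms word n_ex)

-- ===== LEMMAS AND PROOFS =====

-- common specification: all length-m char lists using all of cs in order, rest '!',
-- letter-branch first (lexicographic-combinations order)
def pvS (cs : List Char) (m : Nat) : List (List Char) :=
  match m, cs with
  | 0, [] => [[]]
  | 0, _ :: _ => []
  | m + 1, [] => (pvS [] m).map ('!' :: ·)
  | m + 1, c :: r => (pvS r m).map (c :: ·) ++ (pvS (c :: r) m).map ('!' :: ·)

theorem pvCombs_map {α β : Type} (f : α → β) (l : List α) (k : Nat) :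
    pvCombs (l.map f) k = (pvCombs l k).map (List.map f) := by
  induction l generalizing k with
  | nil => cases k <;> simp [pvCombs]
  | cons x xs ih =>
    cases k with
    | zero => simp [pvCombs]
    | succ k => simp [pvCombs, ih, List.map_map]

-- folding a set over positions all shifted by +1 leaves the head untouched
theorem pvScatter_shift (ps : List (Nat × Char)) (x : Char) (a : List Char) :
    pvScatter (ps.map (fun pc => (pc.1 + 1, pc.2))) (x :: a) = x :: pvScatter ps a := by
  induction ps generalizing a with
  | nil => rfl
  | cons pc ps ih => simp [pvScatter, List.foldl_cons, List.set] at ih ⊢; exact ih _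

-- A's combinations-then-scatter equals the common spec pvS
theorem pvA_eq_S (m : Nat) (cs : List Char) :
    (pvCombs (List.range m) cs.length).map
      (fun pos => pvScatter (pos.zip cs) (List.replicate m '!')) = pvS cs m := by
  induction m generalizing cs with
  | zero =>
    cases cs with
    | nil => simp [pvCombs, pvS, pvScatter]
    | cons c r => simp [pvCombs, pvS]
  | succ m ih =>
    rw [List.range_succ_eq_map]
    cases cs with
    | nil =>
      have h0 : pvS [] m = [List.replicate m '!'] := by
        rw [← ih []]; simp [pvCombs, pvScatter]
      simp [pvCombs, pvScatter, pvS, h0, List.replicate_succ]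
    | cons c r =>
      show ((pvCombs ((List.range m).map Nat.succ) r.length).map (0 :: ·) ++
        pvCombs ((List.range m).map Nat.succ) (r.length + 1)).map _ = _
      rw [pvCombs_map, pvCombs_map, pvS]
      rw [← ih r, ← ih (c :: r)]
      simp only [List.map_append, List.map_map]
      congr 1
      · apply List.map_congr_left; intro pos hpos
        simp only [Function.comp]
        show pvScatter ((0 :: pos.map Nat.succ).zip (c :: r)) (List.replicate (m+1) '!') = _
        rw [List.replicate_succ]
        show pvScatter ((0, c) :: (pos.map Nat.succ).zip r) _ = _
        rw [pvScatter, List.foldl_cons]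
        simp only [List.set]
        have : (pos.map Nat.succ).zip r = (pos.zip r).map (fun pc => (pc.1 + 1, pc.2)) := by
          rw [List.zip_map_left]; rfl
        rw [this]
        exact pvScatter_shift _ _ _
      · apply List.map_congr_left; intro pos hpos
        simp only [Function.comp]
        show pvScatter ((pos.map Nat.succ).zip (c :: r)) (List.replicate (m+1) '!') = _
        rw [List.replicate_succ]
        have : (pos.map Nat.succ).zip (c :: r) = (pos.zip (c :: r)).map (fun pc => (pc.1 + 1, pc.2)) := by
          rw [List.zip_map_left]; rfl
        rw [this]
        exact pvScatter_shift _ _ _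

theorem pvS_nil_of_long (cs : List Char) (m : Nat) (h : m < cs.length) : pvS cs m = [] := by
  induction m generalizing cs with
  | zero => cases cs with
    | nil => simp at h
    | cons c r => simp [pvS]
  | succ m ih => cases cs with
    | nil => simp at h
    | cons c r =>
      simp at h
      simp [pvS, ih r h, ih (c :: r) (by simp; omega)]

-- B's slot-by-slot builder equals the common spec pvS
theorem pvGo_eq_S (m : Nat) (w : List Char) (n i : Int) (j : Nat) (pre : List Char)
    (hm : (n - i).toNat = m) (hj : j ≤ w.length) :
    pvGo w n i j pre = (pvS (w.drop j) m).map (pre ++ ·) := by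
  induction m generalizing i j pre with
  | zero =>
    have hin : i ≥ n := by omega
    rw [pvGo]; simp only [hin, dif_pos]
    by_cases hj2 : j = w.length
    · have : w.drop j = [] := by simp [hj2]
      simp [hj2, pvS]
    · have : w.drop j ≠ [] := by
        simp [List.drop_eq_nil_iff]; omega
      cases hd : w.drop j with
      | nil => exact absurd hd this
      | cons c r => simp [hj2, pvS]
  | succ m ih =>
    have hin : ¬ i ≥ n := by omega
    rw [pvGo]; simp only [hin, dif_neg, not_false_iff]
    by_cases hp : (w.length : Int) - (j : Int) > n - i
    · have hlong : m + 1 < (w.drop j).length := by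
        simp [List.length_drop]; omega
      simp [hp, pvS_nil_of_long _ _ hlong]
    · simp only [hp, if_neg, not_false_iff]
      have hm' : (n - (i + 1)).toNat = m := by omega
      by_cases hjl : j < w.length
      · have hd : w.drop j = w[j] :: w.drop (j + 1) := List.drop_eq_getElem_cons hjl
        rw [dif_pos hjl, ih (i+1) (j+1) _ hm' (by omega), ih (i+1) j _ hm' hj, hd, pvS]
        simp [List.map_map, Function.comp_def, List.append_assoc]
      · have hj2 : j = w.length := by omega
        have hd : w.drop j = [] := by simp [hj2]
        rw [dif_neg hjl, ih (i+1) j _ hm' hj, hd, pvS]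
        simp [List.map_map, Function.comp_def]

theorem gen_perms_spec : Claim_equal_gen_perms := by
  intro word n_ex _
  show gen_perms word n_ex = gen_perms_alt word n_ex
  show (pvCombs (List.range ((word.toList.length : Int) + n_ex).toNat) word.toList.length).map
      (fun pos => String.mk (pvScatter (pos.zip word.toList)
        (List.replicate ((word.toList.length : Int) + n_ex).toNat '!')))
    = (pvGo word.toList ((word.toList.length : Int) + n_ex) 0 0 []).map String.mk
  rw [pvGo_eq_S (((word.toList.length : Int) + n_ex) - 0).toNat _ _ 0 0 []
        (by rw [Int.sub_zero]) (Nat.zero_le _)]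
  simp only [List.drop_zero, Int.sub_zero]
  rw [← pvA_eq_S ((word.toList.length : Int) + n_ex).toNat word.toList]
  simp [List.map_map, Function.comp_def]
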